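-- pv_equiv track=rewrite | github.com/yistLin/cv2016fall | hw7/B03902048_HW7/thinning.py | markIB
-- ===== SOURCE A (Python) =====
-- def markIB(data, hei, wid):
--     ret = [0] * len(data)
--     for y in range(1, hei-1):
--         for x in range(1, wid-1):
--             curr = y * wid + x
--             count = 0
--             if data[curr]:
--                 count += data[curr-1] + data[curr+1]
--                 count += data[curr-wid-1] + data[curr-wid] + data[curr-wid+1]
--                 count += data[curr+wid-1] + data[curr+wid] + data[curr+wid+1]
--                 if count < 8:
--                     ret[curr] = 1
--                 elif count == 8:
--                     ret[curr] = 2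
--     return ret
-- ===== SOURCE B (Python) =====
-- def _rowpre(data, wid, y):
--     # prefix sums of row y: row[x] = sum(data[y*wid : y*wid+x])
--     acc = 0
--     row = [0]
--     for x in range(wid):
--         acc += data[y * wid + x]
--         row.append(acc)
--     return row
--
--
-- def markIB(data, hei, wid):
--     ret = [0] * len(data)
--     if hei < 3 or wid < 3:
--         return ret
--     pre = [_rowpre(data, wid, y) for y in range(hei)]
--     for y in range(1, hei - 1):
--         for x in range(1, wid - 1):
--             curr = y * wid + x
--             if data[curr]:
--                 count = (pre[y - 1][x + 2] - pre[y - 1][x - 1]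
--                          + pre[y][x + 2] - pre[y][x - 1]
--                          + pre[y + 1][x + 2] - pre[y + 1][x - 1]
--                          - data[curr])
--                 if count < 8:
--                     ret[curr] = 1
--                 elif count == 8:
--                     ret[curr] = 2
--     return ret
-- ===== Notes on version B (the rewrite author's own statement) =====
-- stated objective: alternative
-- what changed: B precomputes per-row prefix sums once and classifies each interior pixel from three prefix-sum differences minus the center, instead of gathering the 8 neighbor cells individually per pixel.
-- outside the precondition, e.g. on markIB([0, 0, 0, 0, 0, 0, 0, 0], 3, 3): A returns [0, 0, 0, 0, 0, 0, 0, 0], B raises IndexError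
import Mathlib
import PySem

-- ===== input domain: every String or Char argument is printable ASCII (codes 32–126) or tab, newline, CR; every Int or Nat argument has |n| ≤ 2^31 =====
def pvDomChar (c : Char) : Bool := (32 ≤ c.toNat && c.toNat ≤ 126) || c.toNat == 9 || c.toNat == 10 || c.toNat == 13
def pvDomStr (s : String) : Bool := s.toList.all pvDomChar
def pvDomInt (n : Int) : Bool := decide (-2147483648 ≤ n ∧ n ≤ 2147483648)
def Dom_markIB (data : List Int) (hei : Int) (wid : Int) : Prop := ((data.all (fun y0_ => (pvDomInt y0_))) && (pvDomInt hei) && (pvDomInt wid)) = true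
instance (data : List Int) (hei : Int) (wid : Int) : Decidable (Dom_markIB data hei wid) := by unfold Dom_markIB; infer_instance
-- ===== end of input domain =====

-- B replaces the per-pixel gather of the 8 neighbor cells by per-row prefix sums built once; same cost class, different data structure (objective: alternative).

-- ===== PORT A =====
-- Literal port of A. data[i] reads are ported with pyGetD; Pre_markIB excludes exactly
-- the inputs on which some read raises IndexError, so the default is never taken on Pre_.
def markIB (data : List Int) (hei : Int) (wid : Int) : List Int :=
  (PySem.List.pyRange 1 (hei - 1) 1).foldl (fun ret y =>
    (PySem.List.pyRange 1 (wid - 1) 1).foldl (fun ret x =>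
      let curr := y * wid + x
      let count : Int := 0
      if PySem.List.pyGetD data curr 0 ≠ 0 then
        let count := count + PySem.List.pyGetD data (curr - 1) 0 + PySem.List.pyGetD data (curr + 1) 0
        let count := count + PySem.List.pyGetD data (curr - wid - 1) 0 + PySem.List.pyGetD data (curr - wid) 0 + PySem.List.pyGetD data (curr - wid + 1) 0
        let count := count + PySem.List.pyGetD data (curr + wid - 1) 0 + PySem.List.pyGetD data (curr + wid) 0 + PySem.List.pyGetD data (curr + wid + 1) 0
        if count < 8 then PySem.List.pySetD ret curr 1
        else if count = 8 then PySem.List.pySetD ret curr 2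
        else ret
      else ret) ret)
    (List.replicate data.length 0)

-- ===== PORT B =====
-- Literal port of Source B (helper _rowpre, then the classification loop over prefix sums).
def rowpre (data : List Int) (wid : Int) (y : Int) : List Int :=
  ((PySem.List.pyRange 0 wid 1).foldl (fun (p : Int × List Int) x =>
      let acc := p.1 + PySem.List.pyGetD data (y * wid + x) 0
      (acc, p.2 ++ [acc])) (0, [0])).2

def markIB_alt (data : List Int) (hei : Int) (wid : Int) : List Int :=
  let ret := List.replicate data.length (0 : Int)
  if hei < 3 ∨ wid < 3 then ret
  else
    let pre := (PySem.List.pyRange 0 hei 1).map (fun y => rowpre data wid y)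
    (PySem.List.pyRange 1 (hei - 1) 1).foldl (fun ret y =>
      (PySem.List.pyRange 1 (wid - 1) 1).foldl (fun ret x =>
        let curr := y * wid + x
        if PySem.List.pyGetD data curr 0 ≠ 0 then
          let count := PySem.List.pyGetD (PySem.List.pyGetD pre (y - 1) []) (x + 2) 0
                     - PySem.List.pyGetD (PySem.List.pyGetD pre (y - 1) []) (x - 1) 0
                     + PySem.List.pyGetD (PySem.List.pyGetD pre y []) (x + 2) 0
                     - PySem.List.pyGetD (PySem.List.pyGetD pre y []) (x - 1) 0
                     + PySem.List.pyGetD (PySem.List.pyGetD pre (y + 1) []) (x + 2) 0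
                     - PySem.List.pyGetD (PySem.List.pyGetD pre (y + 1) []) (x - 1) 0
                     - PySem.List.pyGetD data curr 0
          if count < 8 then PySem.List.pySetD ret curr 1
          else if count = 8 then PySem.List.pySetD ret curr 2
          else ret
        else ret) ret)
      ret

-- ===== PRECONDITION & SPEC =====
-- Pre_ excludes inputs with hei ≥ 3, wid ≥ 3 and len(data) < hei*wid: there A raises
-- IndexError for generic data (and returns only accidentally when every interior pixel is 0),
-- and B's prefix-sum pass raises IndexError.
def Pre_markIB (data : List Int) (hei : Int) (wid : Int) : Prop :=
  3 ≤ hei → 3 ≤ wid → hei * wid ≤ (data.length : Int)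
instance (data : List Int) (hei : Int) (wid : Int) : Decidable (Pre_markIB data hei wid) := by
  unfold Pre_markIB; infer_instance

def pvWitness_markIB : List Int × Int × Int := ([1, 1, 1, 1, 1, 1, 1, 1, 1], 3, 3)

def Spec_markIB (data : List Int) (hei : Int) (wid : Int) (out : List Int) : Prop := out = markIB_alt data hei wid
instance (data : List Int) (hei : Int) (wid : Int) (out : List Int) : Decidable (Spec_markIB data hei wid out) := by unfold Spec_markIB; infer_instance

-- ===== CLAIM (what is proved, stated in full; the proofs are below) =====
def Claim_equal_markIB : Prop := ∀ (data : List Int) (hei : Int) (wid : Int), Dom_markIB data hei wid → Pre_markIB data hei wid → Spec_markIB data hei wid (markIB data hei wid)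

-- ===== LEMMAS AND PROOFS =====


def rowsum (data : List Int) (wid y : Int) (k : Nat) : Int :=
  ((List.range k).map (fun i => PySem.List.pyGetD data (y * wid + (i : Int)) 0)).sum

lemma rowsum_succ (data : List Int) (wid y : Int) (k : Nat) :
    rowsum data wid y (k + 1) = rowsum data wid y k + PySem.List.pyGetD data (y * wid + (k : Int)) 0 := by
  simp [rowsum, List.range_succ]

lemma rowpre_aux (data : List Int) (wid y : Int) (n : Nat) :
    (PySem.List.pyRange 0 (n : Int) 1).foldl (fun (p : Int × List Int) x =>
      let acc := p.1 + PySem.List.pyGetD data (y * wid + x) 0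
      (acc, p.2 ++ [acc])) (0, [0])
    = (rowsum data wid y n, (List.range (n + 1)).map (fun k => rowsum data wid y k)) := by
  induction n with
  | zero => simp [PySem.List.pyRange_one_eq_nil, rowsum]
  | succ n ih =>
    have h : ((n : Int) + 1) = ((n + 1 : Nat) : Int) := by push_cast; ring
    rw [← h, PySem.List.pyRange_one_succ_right (by positivity), List.foldl_append, ih]
    simp [rowsum_succ, List.range_succ (n := n + 1)]


lemma rowpre_getD (data : List Int) (wid y k : Int) (hw : 0 ≤ wid) (h0 : 0 ≤ k) (h1 : k ≤ wid) :
    PySem.List.pyGetD (rowpre data wid y) k 0 = rowsum data wid y k.toNat := by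
  have hwn : wid = ((wid.toNat : Nat) : Int) := by omega
  have hk : k = ((k.toNat : Nat) : Int) := by omega
  rw [rowpre, hwn, rowpre_aux, hk, PySem.List.pyGetD_natCast,
      PySem.List.getD_map_range _ _ _ _ (by omega)]
  congr 1

lemma rowdiff (data : List Int) (wid y x : Int) (hw : 0 ≤ wid) (hx1 : 1 ≤ x) (hx2 : x + 2 ≤ wid) :
    PySem.List.pyGetD (rowpre data wid y) (x + 2) 0 - PySem.List.pyGetD (rowpre data wid y) (x - 1) 0
      = PySem.List.pyGetD data (y * wid + x - 1) 0 + PySem.List.pyGetD data (y * wid + x) 0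
        + PySem.List.pyGetD data (y * wid + x + 1) 0 := by
  rw [rowpre_getD data wid y (x + 2) hw (by omega) (by omega),
      rowpre_getD data wid y (x - 1) hw (by omega) (by omega)]
  have h : (x + 2).toNat = (x - 1).toNat + 1 + 1 + 1 := by omega
  rw [h, rowsum_succ, rowsum_succ, rowsum_succ]
  have e1 : y * wid + ((x - 1).toNat : Int) = y * wid + x - 1 := by omega
  have e2 : y * wid + (((x - 1).toNat + 1 : Nat) : Int) = y * wid + x := by push_cast; omega
  have e3 : y * wid + (((x - 1).toNat + 1 + 1 : Nat) : Int) = y * wid + x + 1 := by push_cast; omega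
  rw [e1, e2, e3]; ring

-- ===== VERDICT (by name: the statement is the Claim_ definition above) =====
theorem markIB_spec : Claim_equal_markIB := by
  intro data hei wid _ hpre
  unfold Spec_markIB
  by_cases hsmall : hei < 3 ∨ wid < 3
  · rw [markIB, markIB_alt]
    simp only [if_pos hsmall]
    rcases hsmall with h | h
    · rw [PySem.List.pyRange_one_eq_nil (by omega : hei - 1 ≤ 1), List.foldl_nil]
    · simp only [PySem.List.pyRange_one_eq_nil (by omega : wid - 1 ≤ 1), List.foldl_nil,
        PySem.List.foldl_ignore]
  · have h3h : 3 ≤ hei := by omega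
    have h3w : 3 ≤ wid := by omega
    have hlen : hei * wid ≤ (data.length : Int) := hpre h3h h3w
    rw [markIB, markIB_alt]
    simp only [if_neg hsmall]
    apply PySem.List.foldl_congr_mem'
    intro y hy ret
    rw [PySem.List.mem_pyRange_one] at hy
    apply PySem.List.foldl_congr_mem'
    intro x hx ret'
    rw [PySem.List.mem_pyRange_one] at hx
    rw [PySem.List.pyGetD_map_pyRange_of_nonneg (fun y => rowpre data wid y) hei (y - 1) []
          (by omega) (by omega),
        PySem.List.pyGetD_map_pyRange_of_nonneg (fun y => rowpre data wid y) hei y []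
          (by omega) (by omega),
        PySem.List.pyGetD_map_pyRange_of_nonneg (fun y => rowpre data wid y) hei (y + 1) []
          (by omega) (by omega)]
    have hm := rowdiff data wid (y - 1) x (by omega) (by omega) (by omega)
    have hc := rowdiff data wid y x (by omega) (by omega) (by omega)
    have hp := rowdiff data wid (y + 1) x (by omega) (by omega) (by omega)
    have hm' : PySem.List.pyGetD (rowpre data wid (y - 1)) (x + 2) 0 =
        PySem.List.pyGetD (rowpre data wid (y - 1)) (x - 1) 0
        + (PySem.List.pyGetD data (y * wid + x - wid - 1) 0
          + PySem.List.pyGetD data (y * wid + x - wid) 0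
          + PySem.List.pyGetD data (y * wid + x - wid + 1) 0) := by
      have e1 : (y - 1) * wid + x - 1 = y * wid + x - wid - 1 := by ring
      have e2 : (y - 1) * wid + x = y * wid + x - wid := by ring
      rw [e1, e2] at hm
      omega
    have hc' : PySem.List.pyGetD (rowpre data wid y) (x + 2) 0 =
        PySem.List.pyGetD (rowpre data wid y) (x - 1) 0
        + (PySem.List.pyGetD data (y * wid + x - 1) 0
          + PySem.List.pyGetD data (y * wid + x) 0
          + PySem.List.pyGetD data (y * wid + x + 1) 0) := by omega
    have hp' : PySem.List.pyGetD (rowpre data wid (y + 1)) (x + 2) 0 =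
        PySem.List.pyGetD (rowpre data wid (y + 1)) (x - 1) 0
        + (PySem.List.pyGetD data (y * wid + x + wid - 1) 0
          + PySem.List.pyGetD data (y * wid + x + wid) 0
          + PySem.List.pyGetD data (y * wid + x + wid + 1) 0) := by
      have e1 : (y + 1) * wid + x - 1 = y * wid + x + wid - 1 := by ring
      have e2 : (y + 1) * wid + x = y * wid + x + wid := by ring
      rw [e1, e2] at hp
      omega
    rw [hm', hc', hp']
    ring_nf
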